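-- pv_equiv track=rewrite | github.com/duckweedGuard/bioinformatic_tools | modules/protein_tools.py | determine_total_protein_charge
-- ===== SOURCE A (Python) =====
-- from collections import Counter
--
-- NEG_CHARGED = ['D', 'E']
--
-- POS_CHARGED = ['H', 'K', 'R']
--
-- def determine_total_protein_charge(seq: str) -> str:
--     """
--     Determine whether the protein has positive, negative or neutral charge in neutral pH
--
--     Arguments:
--     - seq (str): amino acid sequence. The input must be uppercase and use the single letter amino acid code
--
--     Returns:
--     - output (str): positive, negative or neutral charge of protein in neutral pH
--     """
--     seq_list = list(seq.strip())
--     aa_cnt = Counter(seq_list)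
--     number_of_pos = sum([aa_cnt[aa] for aa in POS_CHARGED])
--     number_of_neg = sum([aa_cnt[aa] for aa in NEG_CHARGED])
--     if number_of_pos == number_of_neg:
--         return 'neutral'
--     return 'positive' if number_of_pos > number_of_neg else 'negative'
-- ===== SOURCE B (Python) =====
-- NEG_CHARGED = ['D', 'E']
--
-- POS_CHARGED = ['H', 'K', 'R']
--
-- def determine_total_protein_charge(seq: str) -> str:
--     """Single signed accumulator instead of a Counter frequency table."""
--     net = 0
--     for aa in seq.strip():
--         if aa in POS_CHARGED:
--             net += 1
--         elif aa in NEG_CHARGED: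
--             net -= 1
--     if net == 0:
--         return 'neutral'
--     return 'positive' if net > 0 else 'negative'
-- ===== Notes on version B (the rewrite author's own statement) =====
-- stated objective: simpler
-- what changed: Replaces the Counter frequency table plus two list-comprehension sums with a single pass that maintains one signed integer accumulator and compares it to zero.
import Mathlib
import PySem

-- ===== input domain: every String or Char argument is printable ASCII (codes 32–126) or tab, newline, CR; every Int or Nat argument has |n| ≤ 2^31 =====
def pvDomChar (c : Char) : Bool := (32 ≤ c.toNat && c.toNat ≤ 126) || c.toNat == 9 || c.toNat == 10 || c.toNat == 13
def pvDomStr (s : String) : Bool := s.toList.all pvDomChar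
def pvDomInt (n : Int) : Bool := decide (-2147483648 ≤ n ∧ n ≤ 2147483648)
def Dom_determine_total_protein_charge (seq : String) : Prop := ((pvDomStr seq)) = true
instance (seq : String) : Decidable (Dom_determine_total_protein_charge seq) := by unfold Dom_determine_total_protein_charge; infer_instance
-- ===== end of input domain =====

-- B replaces A's Counter table and two comprehension sums with one signed accumulator over a single pass (simpler decomposition, same O(n) cost).


-- ===== PORT A =====
def NEG_CHARGED : List Char := ['D', 'E']
def POS_CHARGED : List Char := ['H', 'K', 'R']

def determine_total_protein_charge (seq : String) : String :=
  let seq_list := (PySem.Str.strip seq).toList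
  let aa_cnt := PySem.Dict.counter seq_list
  let number_of_pos := (POS_CHARGED.map (fun aa => aa_cnt.getD aa 0)).sum
  let number_of_neg := (NEG_CHARGED.map (fun aa => aa_cnt.getD aa 0)).sum
  if number_of_pos = number_of_neg then "neutral"
  else if number_of_pos > number_of_neg then "positive" else "negative"

-- ===== PORT B =====
def determine_total_protein_charge_alt (seq : String) : String :=
  let net : Int := (PySem.Str.strip seq).toList.foldl
    (fun n aa => if aa ∈ POS_CHARGED then n + 1 else if aa ∈ NEG_CHARGED then n - 1 else n) 0
  if net = 0 then "neutral"
  else if net > 0 then "positive" else "negative"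

-- ===== PRECONDITION & SPEC =====
def Spec_determine_total_protein_charge (seq : String) (out : String) : Prop := out = determine_total_protein_charge_alt seq
instance (seq : String) (out : String) : Decidable (Spec_determine_total_protein_charge seq out) := by unfold Spec_determine_total_protein_charge; infer_instance

-- ===== CLAIM (what is proved, stated in full; the proofs are below) =====
def Claim_equal_determine_total_protein_charge : Prop := ∀ (seq : String), Dom_determine_total_protein_charge seq → Spec_determine_total_protein_charge seq (determine_total_protein_charge seq)

-- ===== LEMMAS AND PROOFS =====

-- B's fold equals (initial value) + (#positive residues) − (#negative residues)
theorem net_foldl_eq (l : List Char) (n : Int) :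
    l.foldl (fun n aa => if aa ∈ POS_CHARGED then n + 1 else if aa ∈ NEG_CHARGED then n - 1 else n) n
      = n + ((l.count 'H' : Int) + l.count 'K' + l.count 'R')
          - ((l.count 'D' : Int) + l.count 'E') := by
  induction l generalizing n with
  | nil => simp
  | cons c t ih =>
    rw [List.foldl_cons, ih]
    simp only [List.count_cons, POS_CHARGED, NEG_CHARGED, List.mem_cons, List.not_mem_nil, or_false]
    by_cases h1 : c = 'H' <;> by_cases h2 : c = 'K' <;> by_cases h3 : c = 'R' <;>
      by_cases h4 : c = 'D' <;> by_cases h5 : c = 'E' <;>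
      simp_all <;> push_cast <;> omega

theorem determine_total_protein_charge_spec : Claim_equal_determine_total_protein_charge := by
  intro seq _
  show _ = _
  unfold determine_total_protein_charge determine_total_protein_charge_alt
  rw [net_foldl_eq]
  simp only [POS_CHARGED, NEG_CHARGED, List.map_cons, List.map_nil, List.sum_cons,
    List.sum_nil, PySem.Dict.getD_counter]
  split_ifs <;> first | rfl | omega
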